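-- pv_equiv track=rewrite | github.com/bgyehi/2025_IDM_Lab_Study | guribi_local_search.py | swap_local_search
-- ===== SOURCE A (Python) =====
-- import itertools
--
-- def total_tardiness(order, p, d):
--     time_now = 0
--     total = 0
--     for j in order:
--         time_now += p[j]
--         total += max(0, time_now - d[j])
--     return total
--
-- def swap(seq, i, j):
--     new_seq = seq[:]
--     new_seq[i], new_seq[j] = new_seq[j], new_seq[i]
--     return new_seq
--
-- def swap_local_search(seq, p, d):
--     best_seq = seq[:]
--     best_val = total_tardiness(best_seq, p, d)
--     improved = True
--
--     while improved:
--         improved = False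
--         for i, j in itertools.combinations(range(len(seq)), 2):
--             new_seq = swap(best_seq, i, j)
--             new_val = total_tardiness(new_seq, p, d)
--             if new_val < best_val:
--                 best_seq, best_val = new_seq, new_val
--                 improved = True
--     return best_seq, best_val
-- ===== SOURCE B (Python) =====
-- def _prefixes(s, p, d):
--     # C[k] = completion time after the first k jobs, T[k] = tardiness of the first k jobs
--     t = 0
--     tot = 0
--     C = [0]
--     T = [0]
--     for job in s:
--         t += p[job]
--         tot += max(0, t - d[job])
--         C.append(t)
--         T.append(tot)
--     return C, T
--
-- def swap_local_search(seq, p, d):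
--     n = len(seq)
--     best_seq = list(seq)
--     improved = True
--     while improved:
--         improved = False
--         C, T = _prefixes(best_seq, p, d)
--         best_val = T[-1]
--         for i in range(n - 1):
--             for j in range(i + 1, n):
--                 # only positions i..j change under the swap; re-scan just that segment
--                 mid = [best_seq[j]] + best_seq[i + 1:j] + [best_seq[i]]
--                 t = C[i]
--                 seg = 0
--                 for job in mid:
--                     t += p[job]
--                     seg += max(0, t - d[job])
--                 new_val = best_val - (T[j + 1] - T[i]) + seg
--                 if new_val < best_val:
--                     best_seq[i], best_seq[j] = best_seq[j], best_seq[i]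
--                     C, T = _prefixes(best_seq, p, d)
--                     best_val = T[-1]
--                     improved = True
--     return best_seq, best_val
-- ===== Notes on version B (the rewrite author's own statement) =====
-- stated objective: alternative
-- what changed: Instead of recomputing the whole schedule's tardiness from scratch for every candidate swap, B maintains prefix arrays of completion times and cumulative tardiness along the current best sequence and evaluates a swap (i,j) incrementally, re-scanning only the changed segment i..j (positions outside it are unaffected since the segment's processing-time sum is swap-invariant), refreshing the prefixes on acceptance.
import Mathlib
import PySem

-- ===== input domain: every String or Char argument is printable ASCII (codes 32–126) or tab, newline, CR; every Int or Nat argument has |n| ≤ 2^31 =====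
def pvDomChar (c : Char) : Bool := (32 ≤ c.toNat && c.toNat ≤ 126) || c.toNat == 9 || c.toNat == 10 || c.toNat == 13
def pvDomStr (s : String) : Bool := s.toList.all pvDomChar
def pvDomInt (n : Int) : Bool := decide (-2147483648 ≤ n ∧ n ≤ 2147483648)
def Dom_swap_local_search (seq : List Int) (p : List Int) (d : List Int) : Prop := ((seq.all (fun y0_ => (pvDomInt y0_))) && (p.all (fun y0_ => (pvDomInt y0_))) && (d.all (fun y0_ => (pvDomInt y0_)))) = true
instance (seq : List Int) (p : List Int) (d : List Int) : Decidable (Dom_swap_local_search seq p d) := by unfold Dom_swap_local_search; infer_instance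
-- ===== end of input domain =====

-- B replaces A's from-scratch re-evaluation of every candidate swap by prefix arrays of
-- completion time and cumulative tardiness, re-scanning only the changed segment i..j of the
-- swapped order (objective: alternative evaluation strategy; neither A nor B mutates its arguments).

-- ===== PORT A =====
def pvIdx (xs : List Int) (i : Int) : Int := (PySem.List.pyGet? xs i).getD 0

-- port of total_tardiness: for j in order: time_now += p[j]; total += max(0, time_now - d[j])

def pvTardA (p d : List Int) (order : List Int) : Int :=
  (order.foldl (fun st j => (st.1 + pvIdx p j, st.2 + max 0 (st.1 + pvIdx p j - pvIdx d j)))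
    ((0 : Int), (0 : Int))).2

-- port of swap(seq, i, j): copy, then tuple assignment; exact for the indices 0 ≤ i < j that
-- itertools.combinations(range(len(seq)), 2) produces

def pvSwap (s : List Int) (i j : Int) : List Int :=
  (s.set i.toNat (pvIdx s j)).set j.toNat (pvIdx s i)

-- loop body of A's for i, j in itertools.combinations(...)

def pvStepA (p d : List Int) (st : List Int × Int × Bool) (c : List Int) : List Int × Int × Bool :=
  match c with
  | [i, j] =>
      let ns := pvSwap st.1 i j
      let nv := pvTardA p d ns
      if nv < st.2.1 then (ns, nv, true) else st
  | _ => st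

-- one full sweep over itertools.combinations(range(n), 2)

def pvPassA (p d : List Int) (n : Int) (st : List Int × Int × Bool) : List Int × Int × Bool :=
  (PySem.List.combinations (PySem.List.pyRange 0 n 1) 2).foldl (pvStepA p d) st

-- termination facts the A-loop cites ------------------------------------------------------------
-- mathematical tardiness: pvT2 t l = tardiness of schedule l started at time t (proof-level helper)

-- A's while improved loop; fuel only makes the recursion structural: every pass that still improves
-- strictly decreases the nonnegative integer best_val, so (initial best_val).toNat + 1 passes always suffice
def pvLoopA (p d : List Int) (n : Int) : Nat → List Int → Int → List Int × Int
  | 0, s, v => (s, v)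
  | fuel+1, s, v =>
      let r := pvPassA p d n (s, v, false)
      if r.2.2 = true then pvLoopA p d n fuel r.1 r.2.1 else (r.1, r.2.1)

def swap_local_search (seq : List Int) (p : List Int) (d : List Int) : List Int × Int :=
  pvLoopA p d (seq.length : Int) ((pvTardA p d seq).toNat + 1) seq (pvTardA p d seq)

-- ===== PORT B =====
def pvPrefB (p d : List Int) (s : List Int) : List Int × List Int :=
  let r := s.foldl (fun st job =>
      (st.1 + pvIdx p job,
       st.2.1 + max 0 (st.1 + pvIdx p job - pvIdx d job),
       st.2.2.1 ++ [st.1 + pvIdx p job],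
       st.2.2.2 ++ [st.2.1 + max 0 (st.1 + pvIdx p job - pvIdx d job)]))
    ((0 : Int), (0 : Int), ([0] : List Int), ([0] : List Int))
  (r.2.2.1, r.2.2.2)

-- B's inner loop body for the pair (i, j)

def pvStepB (p d : List Int) (st : List Int × Int × List Int × List Int × Bool) (ij : Int × Int) :
    List Int × Int × List Int × List Int × Bool :=
  let s := st.1
  let v := st.2.1
  let C := st.2.2.1
  let T := st.2.2.2.1
  let mid := [pvIdx s ij.2] ++ PySem.List.slice s (some (ij.1 + 1)) (some ij.2) ++ [pvIdx s ij.1]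
  let seg := (mid.foldl (fun q job => (q.1 + pvIdx p job, q.2 + max 0 (q.1 + pvIdx p job - pvIdx d job)))
      (pvIdx C ij.1, (0 : Int))).2
  let nv := v - (pvIdx T (ij.2 + 1) - pvIdx T ij.1) + seg
  if nv < v then
    let s' := (s.set ij.1.toNat (pvIdx s ij.2)).set ij.2.toNat (pvIdx s ij.1)
    let pr := pvPrefB p d s'
    (s', pvIdx pr.2 (-1), pr.1, pr.2, true)
  else st

-- B's nested for i in range(n-1): for j in range(i+1, n) sweep

def pvPassB (p d : List Int) (n : Int) (st : List Int × Int × List Int × List Int × Bool) :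
    List Int × Int × List Int × List Int × Bool :=
  (PySem.List.pyRange 0 (n - 1) 1).foldl
    (fun st1 i => (PySem.List.pyRange (i + 1) n 1).foldl (fun st2 j => pvStepB p d st2 (i, j)) st1) st

-- lemmas the B-loop cites for termination --------------------------------------------------------

def pvTardOfB (p d s : List Int) : Int := pvIdx (pvPrefB p d s).2 (-1)

-- B's while loop (same structural fuel bound); n = len(seq) is invariant under swapping, so it is
-- recomputed from s here
def pvLoopB (p d : List Int) : Nat → List Int → List Int × Int
  | 0, s => (s, pvTardOfB p d s)
  | fuel+1, s =>
      let pr := pvPrefB p d s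
      let r := pvPassB p d (s.length : Int) (s, pvIdx pr.2 (-1), pr.1, pr.2, false)
      if r.2.2.2.2 = true then pvLoopB p d fuel r.1 else (r.1, r.2.1)

def swap_local_search_alt (seq : List Int) (p : List Int) (d : List Int) : List Int × Int :=
  pvLoopB p d ((pvTardOfB p d seq).toNat + 1) seq

-- ===== PRECONDITION & SPEC =====
-- Pre_: every scheduled index is a valid (possibly negative, Python-style) index into both p and d;
-- outside this, Python A raises IndexError.
def Pre_swap_local_search (seq : List Int) (p : List Int) (d : List Int) : Prop :=
  ∀ j ∈ seq, (-(p.length : Int) ≤ j ∧ j < (p.length : Int)) ∧ (-(d.length : Int) ≤ j ∧ j < (d.length : Int))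
instance (seq : List Int) (p : List Int) (d : List Int) : Decidable (Pre_swap_local_search seq p d) := by
  unfold Pre_swap_local_search; infer_instance

def pvWitness_swap_local_search : List Int × List Int × List Int := ([1, 0, 2], [3, 1, 2], [2, 5, 4])

def Spec_swap_local_search (seq : List Int) (p : List Int) (d : List Int) (out : List Int × Int) : Prop := out = swap_local_search_alt seq p d
instance (seq : List Int) (p : List Int) (d : List Int) (out : List Int × Int) : Decidable (Spec_swap_local_search seq p d out) := by unfold Spec_swap_local_search; infer_instance

-- ===== CLAIM (what is proved, stated in full; the proofs are below) =====
def Claim_equal_swap_local_search : Prop := ∀ (seq : List Int) (p : List Int) (d : List Int), Dom_swap_local_search seq p d → Pre_swap_local_search seq p d → Spec_swap_local_search seq p d (swap_local_search seq p d)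

-- ===== LEMMAS AND PROOFS =====
def pvSumP (p : List Int) (l : List Int) : Int := (l.map (pvIdx p)).sum

def pvT2 (p d : List Int) (t : Int) : List Int → Int
  | [] => 0
  | x :: xs => max 0 (t + pvIdx p x - pvIdx d x) + pvT2 p d (t + pvIdx p x) xs

theorem pvFold_tard (p d : List Int) (l : List Int) : ∀ (t tot : Int),
    l.foldl (fun st job => (st.1 + pvIdx p job, st.2 + max 0 (st.1 + pvIdx p job - pvIdx d job))) (t, tot)
      = (t + pvSumP p l, tot + pvT2 p d t l) := by
  induction l with
  | nil => intro t tot; simp [pvSumP, pvT2]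
  | cons x xs ih =>
      intro t tot
      simp only [List.foldl_cons, ih, pvSumP, pvT2, List.map_cons, List.sum_cons, Prod.mk.injEq]
      constructor <;> ring

theorem pvTardA_eq (p d l : List Int) : pvTardA p d l = pvT2 p d 0 l := by
  simp [pvTardA, pvFold_tard]

theorem pvT2_nonneg (p d : List Int) (l : List Int) : ∀ t, 0 ≤ pvT2 p d t l := by
  induction l with
  | nil => intro t; simp [pvT2]
  | cons x xs ih =>
      intro t
      have h1 : (0:Int) ≤ max 0 (t + pvIdx p x - pvIdx d x) := le_max_left _ _
      have h2 := ih (t + pvIdx p x)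
      simp only [pvT2]; omega

theorem pvStepA_cases (p d : List Int) (st : List Int × Int × Bool) (c : List Int) :
    pvStepA p d st c = st ∨
      (∃ s', pvStepA p d st c = (s', pvTardA p d s', true) ∧ pvTardA p d s' < st.2.1) := by
  rcases c with _ | ⟨i, _ | ⟨j, _ | ⟨x, c⟩⟩⟩
  · exact Or.inl rfl
  · exact Or.inl rfl
  · simp only [pvStepA]
    split_ifs with h
    · exact Or.inr ⟨pvSwap st.1 i j, rfl, h⟩
    · exact Or.inl rfl
  · exact Or.inl rfl

theorem pvPassA_result (p d : List Int) : ∀ (l : List (List Int)) (st : List Int × Int × Bool),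
    l.foldl (pvStepA p d) st = st ∨
      ((l.foldl (pvStepA p d) st).2.1 = pvTardA p d (l.foldl (pvStepA p d) st).1 ∧
       (l.foldl (pvStepA p d) st).2.1 < st.2.1 ∧ (l.foldl (pvStepA p d) st).2.2 = true) := by
  intro l
  induction l with
  | nil => intro st; exact Or.inl rfl
  | cons c cs ih =>
      intro st
      rcases pvStepA_cases p d st c with h | ⟨s', h, hlt⟩
      · simpa [h] using ih st
      · have hst : (pvStepA p d st c).2.1 < st.2.1 := by rw [h]; exact hlt
        rcases ih (pvStepA p d st c) with h2 | ⟨h2a, h2b, h2c⟩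
        · refine Or.inr ?_
          rw [List.foldl_cons, h2, h]
          exact ⟨rfl, hlt, rfl⟩
        · refine Or.inr ?_
          simp only [List.foldl_cons]
          exact ⟨h2a, lt_trans h2b hst, h2c⟩

theorem pvPrefB_go (p d : List Int) : ∀ (l : List Int) (t tot : Int) (C0 T0 : List Int),
    l.foldl (fun st job =>
      (st.1 + pvIdx p job,
       st.2.1 + max 0 (st.1 + pvIdx p job - pvIdx d job),
       st.2.2.1 ++ [st.1 + pvIdx p job],
       st.2.2.2 ++ [st.2.1 + max 0 (st.1 + pvIdx p job - pvIdx d job)])) (t, tot, C0, T0)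
    = (t + pvSumP p l, tot + pvT2 p d t l,
       C0 ++ (List.range l.length).map (fun k => t + pvSumP p (l.take (k+1))),
       T0 ++ (List.range l.length).map (fun k => tot + pvT2 p d t (l.take (k+1)))) := by
  intro l
  induction l with
  | nil => intro t tot C0 T0; simp [pvSumP, pvT2]
  | cons x xs ih =>
      intro t tot C0 T0
      rw [List.foldl_cons, ih]
      simp only [pvSumP, pvT2, List.map_cons, List.sum_cons, List.length_cons,
        List.range_succ_eq_map, List.map_map, List.take_succ_cons, Prod.mk.injEq]
      refine ⟨by ring, by ring, ?_, ?_⟩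
      · rw [List.append_assoc]
        congr 1
        simp only [List.singleton_append, List.map_cons]
        congr 1
        · simp [pvSumP]
        · congr 1; funext k; simp [Function.comp, pvSumP]; ring
      · rw [List.append_assoc]
        congr 1
        simp only [List.singleton_append, List.map_cons]
        congr 1
        · simp [pvSumP, pvT2]
        · congr 1; funext k; simp [Function.comp, pvT2]; ring

theorem pvPrefB_eq (p d s : List Int) : pvPrefB p d s =
    ((List.range (s.length + 1)).map (fun k => pvSumP p (s.take k)),
     (List.range (s.length + 1)).map (fun k => pvT2 p d 0 (s.take k))) := by
  rw [pvPrefB]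
  simp only [pvPrefB_go]
  simp only [List.range_succ_eq_map, List.map_cons, List.map_map]
  simp only [Prod.mk.injEq, List.singleton_append]
  constructor <;> simp [Function.comp, pvSumP, pvT2, Nat.succ_eq_add_one]

theorem pvIdx_map_range (f : Nat → Int) (n : Nat) (i : Int) (h0 : 0 ≤ i) (h1 : i < (n : Int) + 1) :
    pvIdx ((List.range (n + 1)).map f) i = f i.toNat := by
  have hk : i.toNat < n + 1 := by omega
  rw [pvIdx, PySem.List.pyGet?_of_nonneg _ h0]
  simp [List.getElem?_map, List.getElem?_range, hk]

theorem pvIdx_last_range (f : Nat → Int) (n : Nat) :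
    pvIdx ((List.range (n + 1)).map f) (-1) = f n := by
  rw [pvIdx, PySem.List.pyGet?_neg_one]
  rw [List.getLast?_eq_getElem?]
  simp [List.getElem?_map, List.getElem?_range]

theorem pvTardOfB_eq (p d s : List Int) : pvTardOfB p d s = pvT2 p d 0 s := by
  rw [pvTardOfB, pvPrefB_eq, pvIdx_last_range, List.take_length]

theorem pvIdx_getElem (s : List Int) (i : Int) (h0 : 0 ≤ i) (h1 : i < (s.length : Int)) :
    pvIdx s i = s[i.toNat]'(by omega) := by
  rw [pvIdx, PySem.List.pyGet?_of_nonneg _ h0]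
  have : i.toNat < s.length := by omega
  simp [List.getElem?_eq_getElem this]

theorem pvT2_append (p d : List Int) (l1 : List Int) : ∀ (t : Int) (l2 : List Int),
    pvT2 p d t (l1 ++ l2) = pvT2 p d t l1 + pvT2 p d (t + pvSumP p l1) l2 := by
  induction l1 with
  | nil => intro t l2; simp [pvT2, pvSumP]
  | cons x xs ih =>
      intro t l2
      simp only [List.cons_append, pvT2, ih, pvSumP, List.map_cons, List.sum_cons]
      have hA : t + (pvIdx p x + (List.map (pvIdx p) xs).sum) = t + pvIdx p x + (List.map (pvIdx p) xs).sum := by ring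
      rw [hA]; ring

-- list decompositions around a pair of positions I < J

theorem pvDecomp_s (s : List Int) (I J : Nat) (hIJ : I < J) (hJ : J < s.length) :
    s = s.take I ++ (s[I]'(by omega) :: ((s.drop (I+1)).take (J-I-1) ++ (s[J]'hJ :: s.drop (J+1)))) := by
  conv_lhs => rw [← List.take_append_drop I s]
  congr 1
  rw [List.drop_eq_getElem_cons (by omega)]
  congr 1
  conv_lhs => rw [← List.take_append_drop (J-I-1) (s.drop (I+1))]
  congr 1
  rw [List.drop_drop]
  rw [show I+1+(J-I-1) = J from by omega, List.drop_eq_getElem_cons (by omega)]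

theorem pvDecomp_take (s : List Int) (I J : Nat) (hIJ : I < J) (hJ : J < s.length) :
    s.take (J+1) = s.take I ++ (s[I]'(by omega) :: ((s.drop (I+1)).take (J-I-1) ++ [s[J]'hJ])) := by
  conv_lhs => rw [pvDecomp_s s I J hIJ hJ]
  have hlen : (s.take I ++ (s[I]'(by omega) :: ((s.drop (I+1)).take (J-I-1) ++ [s[J]'hJ]))).length = J+1 := by
    simp [List.length_take, List.length_drop]
    omega
  calc (s.take I ++ (s[I]'(by omega) :: ((s.drop (I+1)).take (J-I-1) ++ (s[J]'hJ :: s.drop (J+1))))).take (J+1)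
      = ((s.take I ++ (s[I]'(by omega) :: ((s.drop (I+1)).take (J-I-1) ++ [s[J]'hJ]))) ++ s.drop (J+1)).take (J+1) := by
        simp
    _ = s.take I ++ (s[I]'(by omega) :: ((s.drop (I+1)).take (J-I-1) ++ [s[J]'hJ])) := List.take_left' hlen

theorem pvDecomp_swap (s : List Int) (I J : Nat) (a' b' : Int) (hIJ : I < J) (hJ : J < s.length) :
    (s.set I b').set J a' = s.take I ++ (b' :: ((s.drop (I+1)).take (J-I-1) ++ (a' :: s.drop (J+1)))) := by
  have h1 : s.set I b' = s.take I ++ b' :: s.drop (I+1) := by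
    rw [List.set_eq_take_append_cons_drop]
    simp [show I < s.length by omega]
  rw [h1, List.set_append_right _ _ (by simp [List.length_take]; omega)]
  congr 1
  have h2 : J - (s.take I).length = (J - I - 1) + 1 := by simp [List.length_take]; omega
  rw [h2, List.set_cons_succ]
  congr 1
  rw [List.set_eq_take_append_cons_drop]
  have h3 : J - I - 1 < (s.drop (I+1)).length := by simp [List.length_drop]; omega
  simp only [if_pos h3]
  rw [List.drop_drop]
  have h4 : J - I - 1 + 1 + (I+1) = J + 1 := by omega
  rw [show J-I-1+1 = J-I from by omega, show I+1+(J-I) = J+1 from by omega]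

-- the incremental candidate value equals the from-scratch tardiness of the swapped sequence

theorem pvBig (p d s : List Int) (I J : Nat) (hIJ : I < J) (hJ : J < s.length) :
    pvT2 p d 0 s
      - (pvT2 p d 0 (s.take (J+1)) - pvT2 p d 0 (s.take I))
      + pvT2 p d (pvSumP p (s.take I)) (s[J]'hJ :: ((s.drop (I+1)).take (J-I-1) ++ [s[I]'(by omega)]))
    = pvT2 p d 0 ((s.set I (s[J]'hJ)).set J (s[I]'(by omega))) := by
  set a := s[I]'(by omega) with ha
  set b := s[J]'hJ with hb
  set pre := s.take I with hpre
  set core := (s.drop (I+1)).take (J-I-1) with hcore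
  set suf := s.drop (J+1) with hsuf
  set c := pvSumP p pre with hc
  have hS : pvT2 p d 0 s = pvT2 p d 0 pre + pvT2 p d c (a :: (core ++ (b :: suf))) := by
    conv_lhs => rw [pvDecomp_s s I J hIJ hJ]
    rw [pvT2_append, zero_add]
  have hTk : pvT2 p d 0 (s.take (J+1)) = pvT2 p d 0 pre + pvT2 p d c (a :: (core ++ [b])) := by
    conv_lhs => rw [pvDecomp_take s I J hIJ hJ]
    rw [pvT2_append, zero_add]
  have hSw : pvT2 p d 0 ((s.set I b).set J a) = pvT2 p d 0 pre + pvT2 p d c (b :: (core ++ (a :: suf))) := by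
    conv_lhs => rw [pvDecomp_swap s I J a b hIJ hJ]
    rw [pvT2_append, zero_add]
  -- expand the four segment tardiness values over shared atoms
  have e1 : pvT2 p d c (a :: (core ++ (b :: suf)))
      = max 0 (c + pvIdx p a - pvIdx d a) + pvT2 p d (c + pvIdx p a) core
        + max 0 (c + pvIdx p a + pvSumP p core + pvIdx p b - pvIdx d b)
        + pvT2 p d (c + pvIdx p a + pvSumP p core + pvIdx p b) suf := by
    simp only [pvT2, pvT2_append]
    ring_nf
  have e2 : pvT2 p d c (a :: (core ++ [b]))
      = max 0 (c + pvIdx p a - pvIdx d a) + pvT2 p d (c + pvIdx p a) core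
        + max 0 (c + pvIdx p a + pvSumP p core + pvIdx p b - pvIdx d b) := by
    simp only [pvT2, pvT2_append]
    ring_nf
  have e3 : pvT2 p d c (b :: (core ++ [a]))
      = max 0 (c + pvIdx p b - pvIdx d b) + pvT2 p d (c + pvIdx p b) core
        + max 0 (c + pvIdx p b + pvSumP p core + pvIdx p a - pvIdx d a) := by
    simp only [pvT2, pvT2_append]
    ring_nf
  have e4 : pvT2 p d c (b :: (core ++ (a :: suf)))
      = max 0 (c + pvIdx p b - pvIdx d b) + pvT2 p d (c + pvIdx p b) core
        + max 0 (c + pvIdx p b + pvSumP p core + pvIdx p a - pvIdx d a)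
        + pvT2 p d (c + pvIdx p b + pvSumP p core + pvIdx p a) suf := by
    simp only [pvT2, pvT2_append]
    ring_nf
  have hsame : pvT2 p d (c + pvIdx p b + pvSumP p core + pvIdx p a) suf
      = pvT2 p d (c + pvIdx p a + pvSumP p core + pvIdx p b) suf := by
    congr 1; ring
  rw [hS, hTk, hSw, e1, e2, e3, e4, hsame]
  ring


-- one candidate evaluation: B's incremental value and state update match A's

theorem pvStep_corr (p d s : List Int) (v : Int) (b : Bool) (i j : Int)
    (h0 : 0 ≤ i) (hij : i < j) (hjn : j < (s.length : Int)) (hv : v = pvT2 p d 0 s) :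
    pvStepB p d (s, v, (pvPrefB p d s).1, (pvPrefB p d s).2, b) (i, j)
      = ((pvStepA p d (s, v, b) [i, j]).1, (pvStepA p d (s, v, b) [i, j]).2.1,
         (pvPrefB p d (pvStepA p d (s, v, b) [i, j]).1).1,
         (pvPrefB p d (pvStepA p d (s, v, b) [i, j]).1).2,
         (pvStepA p d (s, v, b) [i, j]).2.2)
    ∧ (pvStepA p d (s, v, b) [i, j]).2.1 = pvT2 p d 0 (pvStepA p d (s, v, b) [i, j]).1
    ∧ (pvStepA p d (s, v, b) [i, j]).1.length = s.length := by
  obtain ⟨I, rfl⟩ : ∃ I : Nat, i = (I : Int) := ⟨i.toNat, by omega⟩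
  obtain ⟨J, rfl⟩ : ∃ J : Nat, j = (J : Int) := ⟨j.toNat, by omega⟩
  have hIJ : I < J := by exact_mod_cast hij
  have hJs : J < s.length := by exact_mod_cast hjn
  have hidxi : pvIdx s (I : Int) = s[I]'(by omega) := by
    rw [pvIdx_getElem s _ (by omega) (by omega)]; simp
  have hidxj : pvIdx s (J : Int) = s[J]'hJs := by
    rw [pvIdx_getElem s _ (by omega) (by omega)]; simp
  have hCi : pvIdx (pvPrefB p d s).1 (I : Int) = pvSumP p (s.take I) := by
    rw [pvPrefB_eq]
    rw [pvIdx_map_range _ s.length _ (by omega) (by push_cast; omega)]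
    simp
  have hTi : pvIdx (pvPrefB p d s).2 (I : Int) = pvT2 p d 0 (s.take I) := by
    rw [pvPrefB_eq]
    rw [pvIdx_map_range _ s.length _ (by omega) (by push_cast; omega)]
    simp
  have hTj : pvIdx (pvPrefB p d s).2 ((J : Int) + 1) = pvT2 p d 0 (s.take (J + 1)) := by
    rw [pvPrefB_eq]
    rw [pvIdx_map_range _ s.length _ (by omega) (by push_cast; omega)]
    rw [show ((J : Int) + 1).toNat = J + 1 from by omega]
  have hslice : PySem.List.slice s (some ((I : Int) + 1)) (some (J : Int)) = (s.drop (I+1)).take (J-I-1) := by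
    rw [PySem.List.slice_toNat _ (by omega) (by omega)]
    rw [show ((I : Int) + 1).toNat = I + 1 from by omega]
    rw [show ((J : Int)).toNat - (I + 1) = J - I - 1 from by omega]
  have hseg : ∀ t0 : Int, ∀ mid : List Int,
      (mid.foldl (fun q job => (q.1 + pvIdx p job, q.2 + max 0 (q.1 + pvIdx p job - pvIdx d job))) (t0, (0:Int))).2
        = pvT2 p d t0 mid := by
    intro t0 mid; rw [pvFold_tard]; ring
  have hnvB : v - (pvIdx (pvPrefB p d s).2 ((J : Int) + 1) - pvIdx (pvPrefB p d s).2 (I : Int))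
        + pvT2 p d (pvIdx (pvPrefB p d s).1 (I : Int)) ((s[J]'hJs) :: ((s.drop (I+1)).take (J-I-1) ++ [s[I]'(by omega)]))
      = pvT2 p d 0 ((s.set I (s[J]'hJs)).set J (s[I]'(by omega))) := by
    rw [hv, hTi, hTj, hCi]
    exact pvBig p d s I J hIJ hJs
  have hlast : ∀ x : List Int, pvIdx (pvPrefB p d x).2 (-1) = pvTardA p d x := by
    intro x
    rw [show pvIdx (pvPrefB p d x).2 (-1) = pvTardOfB p d x from rfl, pvTardOfB_eq, pvTardA_eq]
  simp only [pvStepA, pvStepB, pvSwap, Int.toNat_natCast, hidxi, hidxj, hslice,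
    List.append_assoc, List.singleton_append, List.cons_append, List.nil_append, hseg, hnvB,
    pvTardA_eq, hlast]
  split_ifs with h
  · refine ⟨?_, ?_, ?_⟩ <;> simp [hlast, pvTardA_eq]
  · exact ⟨rfl, hv, rfl⟩

-- one step of B is one step of A, viewed through the prefix-array state

theorem pvPass_corr (p d : List Int) (n : Int) : ∀ (l : List (Int × Int)) (s : List Int) (v : Int) (b : Bool),
    (∀ ij ∈ l, 0 ≤ ij.1 ∧ ij.1 < ij.2 ∧ ij.2 < n) → ((s.length : Int) = n) → v = pvT2 p d 0 s →
    (l.foldl (fun st ij => pvStepB p d st ij) (s, v, (pvPrefB p d s).1, (pvPrefB p d s).2, b)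
        = ((l.foldl (fun st ij => pvStepA p d st [ij.1, ij.2]) (s, v, b)).1,
           (l.foldl (fun st ij => pvStepA p d st [ij.1, ij.2]) (s, v, b)).2.1,
           (pvPrefB p d (l.foldl (fun st ij => pvStepA p d st [ij.1, ij.2]) (s, v, b)).1).1,
           (pvPrefB p d (l.foldl (fun st ij => pvStepA p d st [ij.1, ij.2]) (s, v, b)).1).2,
           (l.foldl (fun st ij => pvStepA p d st [ij.1, ij.2]) (s, v, b)).2.2))
      ∧ (l.foldl (fun st ij => pvStepA p d st [ij.1, ij.2]) (s, v, b)).2.1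
          = pvT2 p d 0 (l.foldl (fun st ij => pvStepA p d st [ij.1, ij.2]) (s, v, b)).1
      ∧ (((l.foldl (fun st ij => pvStepA p d st [ij.1, ij.2]) (s, v, b)).1.length : Int) = n) := by
  intro l
  induction l with
  | nil =>
      intro s v b _ hlen hv
      exact ⟨rfl, hv, hlen⟩
  | cons ij l ih =>
      intro s v b hbnd hlen hv
      obtain ⟨i, j⟩ := ij
      have hb := hbnd (i, j) (List.mem_cons_self ..)
      have hsc := pvStep_corr p d s v b i j hb.1 hb.2.1 (by rw [hlen]; exact hb.2.2) hv
      rw [List.foldl_cons, List.foldl_cons, hsc.1]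
      have heta : ((pvStepA p d (s, v, b) [i, j]).1, (pvStepA p d (s, v, b) [i, j]).2.1,
          (pvStepA p d (s, v, b) [i, j]).2.2) = pvStepA p d (s, v, b) [i, j] := rfl
      have := ih (pvStepA p d (s, v, b) [i, j]).1 (pvStepA p d (s, v, b) [i, j]).2.1
        (pvStepA p d (s, v, b) [i, j]).2.2
        (fun ij hij => hbnd ij (List.mem_cons_of_mem _ hij))
        (by rw [← hlen]; exact_mod_cast congrArg (Nat.cast : Nat → Int) hsc.2.2)
        hsc.2.1
      rw [heta] at this
      exact this

theorem pvPassB_flat (p d : List Int) (n : Int) (st : List Int × Int × List Int × List Int × Bool) :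
    pvPassB p d n st = ((PySem.List.pyRange 0 (n-1) 1).flatMap
      (fun i => (PySem.List.pyRange (i+1) n 1).map (fun j => (i, j)))).foldl
        (fun st ij => pvStepB p d st ij) st := by
  rw [pvPassB, List.foldl_flatMap]
  congr 1
  funext acc i
  rw [List.foldl_map]

theorem pvPairs_bounds (n : Int) (ij : Int × Int) :
    ij ∈ ((PySem.List.pyRange 0 n 1).flatMap
      (fun i => (PySem.List.pyRange (i+1) n 1).map (fun j => (i, j)))) →
    0 ≤ ij.1 ∧ ij.1 < ij.2 ∧ ij.2 < n := by
  intro h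
  rcases List.mem_flatMap.mp h with ⟨i, hi, hij⟩
  rcases List.mem_map.mp hij with ⟨j, hj, rfl⟩
  rw [PySem.List.mem_pyRange_one] at hi hj
  exact ⟨hi.1, by omega, hj.2⟩

theorem pvCombos_pairs : ∀ (k : Nat) (a n : Int), (n - a).toNat = k →
    PySem.List.combinations (PySem.List.pyRange a n 1) 2
      = ((PySem.List.pyRange a n 1).flatMap
          (fun i => (PySem.List.pyRange (i+1) n 1).map (fun j => [i, j]))) := by
  intro k
  induction k with
  | zero =>
      intro a n h
      rw [PySem.List.pyRange_one_eq_nil (by omega)]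
      simp [PySem.List.combinations_nil_succ]
  | succ k ih =>
      intro a n h
      have ha : a < n := by omega
      rw [PySem.List.pyRange_one_cons ha, PySem.List.combinations_cons_succ,
        PySem.List.combinations_one, List.flatMap_cons, ih (a+1) n (by omega)]
      congr 1
      simp [List.map_map, Function.comp]

theorem pvPairs_eq (n : Int) :
    ((PySem.List.pyRange 0 (n-1) 1).flatMap (fun i => (PySem.List.pyRange (i+1) n 1).map (fun j => (i, j))))
      = ((PySem.List.pyRange 0 n 1).flatMap (fun i => (PySem.List.pyRange (i+1) n 1).map (fun j => (i, j)))) := by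
  by_cases hn : n ≤ 0
  · rw [PySem.List.pyRange_one_eq_nil (by omega), PySem.List.pyRange_one_eq_nil (by omega)]
  · have h1 : PySem.List.pyRange 0 n 1 = PySem.List.pyRange 0 (n-1) 1 ++ [n-1] := by
      have := PySem.List.pyRange_one_succ_right (a := 0) (b := n-1) (by omega)
      rw [show n-1+1 = n from by ring] at this
      exact this
    rw [h1, List.flatMap_append]
    rw [List.flatMap_cons, List.flatMap_nil, PySem.List.pyRange_one_eq_nil (by omega : n ≤ n-1+1)]
    simp

theorem pvPassA_pairs (p d : List Int) (n : Int) (st : List Int × Int × Bool) :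
    pvPassA p d n st = ((PySem.List.pyRange 0 n 1).flatMap
      (fun i => (PySem.List.pyRange (i+1) n 1).map (fun j => (i, j)))).foldl
        (fun st ij => pvStepA p d st [ij.1, ij.2]) st := by
  rw [pvPassA, pvCombos_pairs (n - 0).toNat 0 n rfl]
  rw [show (PySem.List.pyRange 0 n 1).flatMap
        (fun i => (PySem.List.pyRange (i+1) n 1).map (fun j => ([i, j] : List Int)))
      = ((PySem.List.pyRange 0 n 1).flatMap
          (fun i => (PySem.List.pyRange (i+1) n 1).map (fun j => (i, j)))).map
            (fun ij => [ij.1, ij.2]) from by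
    rw [List.map_flatMap]
    congr 1
    funext i
    rw [List.map_map]
    rfl]
  rw [List.foldl_map]

theorem pvLoop_corr (p d : List Int) : ∀ (fuel : Nat) (s : List Int), (pvT2 p d 0 s).toNat < fuel →
    pvLoopB p d fuel s = pvLoopA p d (s.length : Int) fuel s (pvTardA p d s) := by
  intro fuel
  induction fuel with
  | zero => intro s h; omega
  | succ fuel ih =>
  intro s hN
  have hvA : pvTardA p d s = pvT2 p d 0 s := pvTardA_eq p d s
  have hveq : pvIdx (pvPrefB p d s).2 (-1) = pvTardA p d s := by
    have h1 := pvTardOfB_eq p d s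
    rw [pvTardOfB] at h1
    rw [h1, hvA]
  have hpc := pvPass_corr p d (s.length : Int)
      ((PySem.List.pyRange 0 (s.length : Int) 1).flatMap
        (fun i => (PySem.List.pyRange (i+1) (s.length : Int) 1).map (fun j => (i, j))))
      s (pvTardA p d s) false (fun ij hij => pvPairs_bounds _ ij hij) rfl hvA
  set rA := ((PySem.List.pyRange 0 (s.length : Int) 1).flatMap
      (fun i => (PySem.List.pyRange (i+1) (s.length : Int) 1).map (fun j => (i, j)))).foldl
        (fun st ij => pvStepA p d st [ij.1, ij.2]) (s, pvTardA p d s, false) with hrA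
  have hBpass : pvPassB p d (s.length : Int)
        (s, pvIdx (pvPrefB p d s).2 (-1), (pvPrefB p d s).1, (pvPrefB p d s).2, false)
      = (rA.1, rA.2.1, (pvPrefB p d rA.1).1, (pvPrefB p d rA.1).2, rA.2.2) := by
    rw [hveq, pvPassB_flat, pvPairs_eq, hpc.1]
  have hApass : pvPassA p d (s.length : Int) (s, pvTardA p d s, false) = rA := by
    rw [pvPassA_pairs, hrA]
  have hA := pvPassA_result p d
    (PySem.List.combinations (PySem.List.pyRange 0 (s.length : Int) 1) 2) (s, pvTardA p d s, false)
  rw [show (PySem.List.combinations (PySem.List.pyRange 0 (s.length : Int) 1) 2).foldl (pvStepA p d)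
        (s, pvTardA p d s, false)
      = pvPassA p d (s.length : Int) (s, pvTardA p d s, false) from rfl, hApass] at hA
  rw [pvLoopB, pvLoopA]
  simp only [hBpass, hApass]
  by_cases him : rA.2.2 = true
  · rcases hA with he | ⟨hva, hlt, _⟩
    · rw [he] at him; simp at him
    · have hm1 : rA.2.1 = pvT2 p d 0 rA.1 := hpc.2.1
      have h2 := pvT2_nonneg p d rA.1 0
      have h3 := pvT2_nonneg p d s 0
      have hlt' : rA.2.1 < pvTardA p d s := hlt
      rw [hvA] at hlt'
      have hrec := ih rA.1 (by omega)
      have hlen : ((rA.1.length : Nat) : Int) = ((s.length : Nat) : Int) := hpc.2.2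
      simp only [him, if_true]
      rw [hrec, hlen, ← hva]
  · simp only [him, if_false, Bool.not_eq_true] at *
    simp [him]

-- ===== VERDICT (by name: the statement is the Claim_ definition above) =====
theorem swap_local_search_spec : Claim_equal_swap_local_search := by
  intro seq p d _ _
  unfold Spec_swap_local_search swap_local_search swap_local_search_alt
  have hf : (pvTardOfB p d seq).toNat = (pvTardA p d seq).toNat := by
    rw [pvTardOfB_eq, pvTardA_eq]
  rw [hf]
  exact (pvLoop_corr p d ((pvTardA p d seq).toNat + 1) seq (by rw [pvTardA_eq]; omega)).symm
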